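-- pv_equiv track=rewrite | github.com/dafiiit/Mr.-Botter | tests/auslegung_Feed_foreward.py | calculate_layers
-- ===== SOURCE A (Python) =====
-- TOPS = 13 * 10**12  # 13 Tera Operations per Second
--
-- RAM_LIMIT_BYTES = 6 * 10**9  # 6 GB in Bytes
--
-- FLOAT_SIZE_BYTES = 4  # 32-bit float size in bytes
--
-- def calculate_ram(layers):
--     total_weights = sum([layers[i] * layers[i + 1] for i in range(len(layers) - 1)])
--     total_biases = sum(layers)
--     total_ram = (total_weights + total_biases) * FLOAT_SIZE_BYTES
--     return total_ram
--
-- def calculate_operations(layers):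
--     total_operations = 0
--     for i in range(len(layers) - 1):
--         n = layers[i]
--         next_n = layers[i + 1]
--         # Using the formula: 2n^3 - n^2 for each layer transition
--         total_operations += 2 * (n**3) - (n**2)
--     return total_operations
--
-- def calculate_layers(num_layers, MULTIPLIKATION_PER_SEC):
--     # Start with a small number of neurons
--     n = 10
--     layers = [n**2] * num_layers
--
--     while True:
--         total_operations = calculate_operations(layers)
--         total_ram = calculate_ram(layers)
--
--         if total_operations * MULTIPLIKATION_PER_SEC < TOPS and total_ram < RAM_LIMIT_BYTES:
--             # Try increasing the neurons per layer
--             n += 1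
--             layers = [n**2] * num_layers
--         else:
--             # If we exceed either limit, backtrack slightly to ensure we stay within bounds
--             n -= 1
--             layers = [n**2] * num_layers
--             break
--
--     return layers
-- ===== SOURCE B (Python) =====
-- TOPS = 13 * 10**12
-- RAM_LIMIT_BYTES = 6 * 10**9
-- FLOAT_SIZE_BYTES = 4
--
-- def calculate_layers(num_layers, MULTIPLIKATION_PER_SEC):
--     # Closed-form cost of the uniform architecture [n**2] * num_layers,
--     # then binary search for the largest feasible n (the condition is antitone in n).
--     L = num_layers
--
--     def ok(n):
--         x = n * n
--         ops = (L - 1) * (2 * x**3 - x**2)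
--         ram = ((L - 1) * x * x + L * x) * FLOAT_SIZE_BYTES
--         return ops * MULTIPLIKATION_PER_SEC < TOPS and ram < RAM_LIMIT_BYTES
--
--     lo, hi = 10, 40000  # ok(40000) is False for any L >= 1 (RAM alone exceeds the limit)
--     while lo < hi:
--         mid = (lo + hi) // 2
--         if ok(mid):
--             lo = mid + 1
--         else:
--             hi = mid
--     n = lo - 1
--     return [n * n] * num_layers
-- ===== Notes on version B (the rewrite author's own statement) =====
-- stated objective: faster
-- what changed: B replaces A's linear increment-and-rebuild scan over n (recomputing ops/RAM over the whole layer list each step) by a binary search over n with closed-form O(1) cost formulas, exploiting that the feasibility condition is antitone in n.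
-- outside the precondition, e.g. on calculate_layers(0, 1): A does not finish within the time limit, B returns []
import Mathlib
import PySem

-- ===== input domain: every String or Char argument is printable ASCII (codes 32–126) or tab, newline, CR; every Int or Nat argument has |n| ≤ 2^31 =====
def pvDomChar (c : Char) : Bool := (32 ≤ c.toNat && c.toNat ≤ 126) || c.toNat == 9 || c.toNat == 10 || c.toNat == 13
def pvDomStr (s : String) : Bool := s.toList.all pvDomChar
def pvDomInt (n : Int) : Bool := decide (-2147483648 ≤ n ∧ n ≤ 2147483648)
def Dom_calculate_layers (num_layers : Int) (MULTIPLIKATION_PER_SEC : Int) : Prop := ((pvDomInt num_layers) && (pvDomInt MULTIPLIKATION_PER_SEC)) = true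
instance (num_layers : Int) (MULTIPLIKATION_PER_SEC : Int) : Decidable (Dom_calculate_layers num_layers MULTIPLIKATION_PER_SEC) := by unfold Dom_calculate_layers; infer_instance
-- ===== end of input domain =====

-- B replaces A's linear scan over n by a binary search with closed-form op/RAM costs
-- (objective: faster — the feasibility condition is antitone in n). Equivalence is proved
-- for num_layers ≥ 1 (Pre_); for num_layers ≤ 0 Python A loops forever and returns nothing.


-- ===== PORT A =====
-- module constants
def pvTOPS : Int := 13 * 10^12
def pvRAM_LIMIT_BYTES : Int := 6 * 10^9
def pvFLOAT_SIZE_BYTES : Int := 4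

-- calculate_ram(layers)
def pvCalcRam (layers : List Int) : Int :=
  let total_weights :=
    ((List.range (layers.length - 1)).map
      (fun (i : Nat) => PySem.List.pyGetD layers ((i : Int)) 0 * PySem.List.pyGetD layers ((i : Int) + 1) 0)).sum
  let total_biases := layers.sum
  (total_weights + total_biases) * pvFLOAT_SIZE_BYTES

-- calculate_operations(layers)
def pvCalcOps (layers : List Int) : Int :=
  (List.range (layers.length - 1)).foldl
    (fun total_operations (i : Nat) =>
      let n := PySem.List.pyGetD layers (i : Int) 0
      let _next_n := PySem.List.pyGetD layers ((i : Int) + 1) 0  -- bound but unused, as in A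
      total_operations + (2 * n^3 - n^2)) 0

-- the 'while True' loop of A; fuel bounds the iterations (the loop provably stops before
-- n reaches 38731 when num_layers ≥ 1; for num_layers ≤ 0 Python diverges — outside Pre_)
def pvLoopA (num_layers M : Int) : Nat → Int → List Int
  | 0, n => List.replicate num_layers.toNat (n^2)
  | fuel+1, n =>
    let layers := List.replicate num_layers.toNat (n^2)
    if pvCalcOps layers * M < pvTOPS ∧ pvCalcRam layers < pvRAM_LIMIT_BYTES then
      pvLoopA num_layers M fuel (n + 1)
    else
      List.replicate num_layers.toNat ((n - 1)^2)

def calculate_layers (num_layers : Int) (MULTIPLIKATION_PER_SEC : Int) : List Int :=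
  pvLoopA num_layers MULTIPLIKATION_PER_SEC 40000 10

-- ===== PORT B =====
-- ok(n): closed-form op/RAM feasibility of [n*n] * num_layers
def pvOkB (L M n : Int) : Bool :=
  let x := n * n
  let ops := (L - 1) * (2 * x^3 - x^2)
  let ram := ((L - 1) * x * x + L * x) * pvFLOAT_SIZE_BYTES
  decide (ops * M < pvTOPS ∧ ram < pvRAM_LIMIT_BYTES)

-- the while-loop of B: binary search for the first infeasible n in [lo, hi]
def pvBS (L M lo hi : Int) : Int :=
  if h : lo < hi then
    let mid := PySem.Int.floordiv (lo + hi) 2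
    if pvOkB L M mid then pvBS L M (mid + 1) hi else pvBS L M lo mid
  else lo
termination_by (hi - lo).toNat
decreasing_by
  · have h1 : lo ≤ PySem.Int.floordiv (lo + hi) 2 := by
      rw [PySem.Int.le_floordiv_iff_mul_le (by norm_num)]; omega
    omega
  · have h2 : PySem.Int.floordiv (lo + hi) 2 < hi := by
      rw [PySem.Int.floordiv_lt_iff_lt_mul (by norm_num)]; omega
    omega

def calculate_layers_alt (num_layers : Int) (MULTIPLIKATION_PER_SEC : Int) : List Int :=
  let lo := pvBS num_layers MULTIPLIKATION_PER_SEC 10 40000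
  let n := lo - 1
  List.replicate num_layers.toNat (n * n)

-- ===== PRECONDITION & SPEC =====
-- Pre_ excludes num_layers ≤ 0: there Python A's 'while True' never terminates (empty layer
-- list keeps both costs at 0), so A returns no value.
def Pre_calculate_layers (num_layers : Int) (MULTIPLIKATION_PER_SEC : Int) : Prop :=
  1 ≤ num_layers
instance (num_layers : Int) (MULTIPLIKATION_PER_SEC : Int) : Decidable (Pre_calculate_layers num_layers MULTIPLIKATION_PER_SEC) := by unfold Pre_calculate_layers; infer_instance

def pvWitness_calculate_layers : Int × Int := (2, 1)

def Spec_calculate_layers (num_layers : Int) (MULTIPLIKATION_PER_SEC : Int) (out : List Int) : Prop := out = calculate_layers_alt num_layers MULTIPLIKATION_PER_SEC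
instance (num_layers : Int) (MULTIPLIKATION_PER_SEC : Int) (out : List Int) : Decidable (Spec_calculate_layers num_layers MULTIPLIKATION_PER_SEC out) := by unfold Spec_calculate_layers; infer_instance

-- ===== CLAIM (what is proved, stated in full; the proofs are below) =====
def Claim_equal_calculate_layers : Prop := ∀ (num_layers : Int) (MULTIPLIKATION_PER_SEC : Int), Dom_calculate_layers num_layers MULTIPLIKATION_PER_SEC → Pre_calculate_layers num_layers MULTIPLIKATION_PER_SEC → Spec_calculate_layers num_layers MULTIPLIKATION_PER_SEC (calculate_layers num_layers MULTIPLIKATION_PER_SEC)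

-- ===== LEMMAS AND PROOFS =====

-- indexing a replicate inside its range
lemma pv_getD_replicate (x d : Int) (m i : Nat) (h : i < m) :
    PySem.List.pyGetD (List.replicate m x) (i : Int) d = x := by
  simp [PySem.List.pyGetD_natCast, h, List.getD]

-- closed form of A's calculate_operations on a uniform layer list
lemma pv_ops_closed (L n : Int) (hL : 1 ≤ L) :
    pvCalcOps (List.replicate L.toNat (n^2)) = (L - 1) * (2 * (n^2)^3 - (n^2)^2) := by
  unfold pvCalcOps
  simp only [List.length_replicate]
  refine Eq.trans (PySem.List.foldl_add (List.range (L.toNat - 1))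
    (fun (i : Nat) =>
      2 * (PySem.List.pyGetD (List.replicate L.toNat (n^2)) (i : Int) 0)^3
        - (PySem.List.pyGetD (List.replicate L.toNat (n^2)) (i : Int) 0)^2) 0) ?_
  rw [List.map_congr_left (g := fun _ => 2 * (n^2)^3 - (n^2)^2) (fun i hi => by
      have h : i < L.toNat := by have := List.mem_range.mp hi; omega
      rw [pv_getD_replicate (n^2) 0 L.toNat i h])]
  rw [PySem.List.sum_map_const_int]
  simp only [List.length_range]
  have h1 : ((L.toNat - 1 : Nat) : Int) = L - 1 := by omega
  rw [h1]; ring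

-- closed form of A's calculate_ram on a uniform layer list
lemma pv_ram_closed (L n : Int) (hL : 1 ≤ L) :
    pvCalcRam (List.replicate L.toNat (n^2)) = ((L - 1) * (n^2 * n^2) + L * n^2) * 4 := by
  unfold pvCalcRam
  simp only [List.length_replicate]
  rw [List.map_congr_left (g := fun _ => (n^2) * (n^2)) (fun i hi => by
      have h : i < L.toNat - 1 := List.mem_range.mp hi
      rw [pv_getD_replicate (n^2) 0 L.toNat i (by omega)]
      have h2 : (((i : Int)) + 1) = ((i + 1 : Nat) : Int) := by push_cast; ring
      rw [h2, pv_getD_replicate (n^2) 0 L.toNat (i+1) (by omega)])]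
  rw [PySem.List.sum_map_const_int, List.sum_replicate]
  simp only [List.length_range, nsmul_eq_mul, pvFLOAT_SIZE_BYTES]
  have h1 : ((L.toNat - 1 : Nat) : Int) = L - 1 := by omega
  have h2 : ((L.toNat : Nat) : Int) = L := by omega
  rw [h1, h2]

-- A's loop condition on [n^2]*L is exactly B's ok(n)
lemma pv_cond_eq (L M n : Int) (hL : 1 ≤ L) :
    (pvCalcOps (List.replicate L.toNat (n^2)) * M < pvTOPS ∧
     pvCalcRam (List.replicate L.toNat (n^2)) < pvRAM_LIMIT_BYTES) ↔ pvOkB L M n = true := by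
  rw [pv_ops_closed L n hL, pv_ram_closed L n hL]
  have e1 : (L - 1) * (2 * (n^2)^3 - (n^2)^2) = (L - 1) * (2 * (n*n)^3 - (n*n)^2) := by ring
  have e2 : ((L - 1) * (n^2 * n^2) + L * n^2) * 4
      = ((L - 1) * (n*n) * (n*n) + L * (n*n)) * pvFLOAT_SIZE_BYTES := by
    simp only [pvFLOAT_SIZE_BYTES]; ring
  rw [e1, e2]
  simp [pvOkB]

-- ok is antitone in n on n ≥ 10 (for num_layers ≥ 1)
lemma pv_ok_antitone (L M k m : Int) (hL : 1 ≤ L) (hk : 10 ≤ k) (hkm : k ≤ m)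
    (hm : pvOkB L M m = true) : pvOkB L M k = true := by
  simp only [pvOkB, decide_eq_true_eq, pvTOPS, pvRAM_LIMIT_BYTES, pvFLOAT_SIZE_BYTES] at hm ⊢
  obtain ⟨hops, hram⟩ := hm
  have hx : (0:Int) ≤ k*k := by positivity
  have hxy : k*k ≤ m*m := by nlinarith
  have h3 := pow_le_pow_left₀ hx hxy 3
  have h2' := pow_le_pow_left₀ hx hxy 2
  have h1' : (1:Int) ≤ k*k := by nlinarith
  have hfmono : 2 * (k*k)^3 - (k*k)^2 ≤ 2 * (m*m)^3 - (m*m)^2 := by nlinarith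
  have hL0 : (0:Int) ≤ L - 1 := by omega
  constructor
  · by_cases hM : 0 ≤ M
    · have : (L - 1) * (2 * (k*k)^3 - (k*k)^2) ≤ (L - 1) * (2 * (m*m)^3 - (m*m)^2) :=
        mul_le_mul_of_nonneg_left hfmono hL0
      calc (L - 1) * (2 * (k*k)^3 - (k*k)^2) * M ≤ (L - 1) * (2 * (m*m)^3 - (m*m)^2) * M :=
            mul_le_mul_of_nonneg_right this hM
        _ < 13 * 10^12 := hops
    · have hinner : (0:Int) ≤ 2 * (k*k)^3 - (k*k)^2 := by
        have := mul_nonneg (mul_nonneg hx hx) (show (0:Int) ≤ 2*(k*k) - 1 by linarith)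
        nlinarith [this]
      have hnn : 0 ≤ (L - 1) * (2 * (k*k)^3 - (k*k)^2) := mul_nonneg hL0 hinner
      have : (L - 1) * (2 * (k*k)^3 - (k*k)^2) * M ≤ 0 :=
        mul_nonpos_of_nonneg_of_nonpos hnn (by omega)
      calc (L - 1) * (2 * (k*k)^3 - (k*k)^2) * M ≤ 0 := this
        _ < 13 * 10^12 := by norm_num
  · have : ((L-1) * (k*k) * (k*k) + L * (k*k)) ≤ ((L-1) * (m*m) * (m*m) + L * (m*m)) := by
      nlinarith
    linarith

-- ok fails from n = 38730 on: RAM alone exceeds the limit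
lemma pv_ok_big (L M n : Int) (hL : 1 ≤ L) (hn : 38730 ≤ n) : pvOkB L M n = false := by
  simp only [pvOkB, pvRAM_LIMIT_BYTES, pvFLOAT_SIZE_BYTES, decide_eq_false_iff_not, not_and, not_lt]
  intro _
  have hx : (1500012900:Int) ≤ n*n := by nlinarith
  nlinarith [mul_nonneg (mul_nonneg (by omega : (0:Int) ≤ L - 1) (by nlinarith : (0:Int) ≤ n*n)) (by nlinarith : (0:Int) ≤ n*n),
             mul_le_mul_of_nonneg_right (by omega : (1:Int) ≤ L) (by nlinarith : (0:Int) ≤ n*n)]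

-- binary-search invariant: result r is the first infeasible n, with lo ≤ r ≤ hi
lemma pv_bs_inv (L M : Int) (hL : 1 ≤ L) (lo hi : Int) (hlo : 10 ≤ lo) (hlh : lo ≤ hi)
    (hhi : pvOkB L M hi = false) (hbelow : ∀ k, 10 ≤ k → k < lo → pvOkB L M k = true) :
    pvOkB L M (pvBS L M lo hi) = false ∧
    (∀ k, 10 ≤ k → k < pvBS L M lo hi → pvOkB L M k = true) ∧
    lo ≤ pvBS L M lo hi ∧ pvBS L M lo hi ≤ hi := by
  have H : ∀ N : Nat, ∀ lo hi : Int, (hi - lo).toNat ≤ N → 10 ≤ lo → lo ≤ hi →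
      pvOkB L M hi = false → (∀ k, 10 ≤ k → k < lo → pvOkB L M k = true) →
      pvOkB L M (pvBS L M lo hi) = false ∧
      (∀ k, 10 ≤ k → k < pvBS L M lo hi → pvOkB L M k = true) ∧
      lo ≤ pvBS L M lo hi ∧ pvBS L M lo hi ≤ hi := by
    intro N
    induction N with
    | zero =>
      intro lo hi hN hlo hlh hhi hbelow
      have heq : lo = hi := by omega
      have hnlt : ¬ lo < hi := by omega
      rw [pvBS, dif_neg hnlt]
      exact ⟨by rw [heq]; exact hhi, fun k hk hk' => hbelow k hk hk', le_refl lo, hlh⟩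
    | succ N ih =>
      intro lo hi hN hlo hlh hhi hbelow
      by_cases hlt : lo < hi
      · have hmid1 : lo ≤ PySem.Int.floordiv (lo + hi) 2 := by
          rw [PySem.Int.le_floordiv_iff_mul_le (by norm_num)]; omega
        have hmid2 : PySem.Int.floordiv (lo + hi) 2 < hi := by
          rw [PySem.Int.floordiv_lt_iff_lt_mul (by norm_num)]; omega
        rw [pvBS]
        simp only [hlt, dif_pos]
        cases hok : pvOkB L M (PySem.Int.floordiv (lo + hi) 2) with
        | false =>
          simp only [if_neg, Bool.false_eq_true, not_false_iff]
          have := ih lo (PySem.Int.floordiv (lo + hi) 2) (by omega) hlo hmid1 hok hbelow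
          exact ⟨this.1, this.2.1, this.2.2.1, le_trans this.2.2.2 (le_of_lt hmid2)⟩
        | true =>
          simp only [if_pos]
          have hbelow' : ∀ k, 10 ≤ k → k < PySem.Int.floordiv (lo + hi) 2 + 1 → pvOkB L M k = true := by
            intro k hk hk'
            exact pv_ok_antitone L M k (PySem.Int.floordiv (lo + hi) 2) hL hk (by omega) hok
          have := ih (PySem.Int.floordiv (lo + hi) 2 + 1) hi (by omega) (by omega) (by omega) hhi hbelow'
          exact ⟨this.1, this.2.1, le_trans (by omega) this.2.2.1, this.2.2.2⟩
      · have heq : lo = hi := by omega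
        have hnlt : ¬ lo < hi := by omega
        rw [pvBS, dif_neg hnlt]
        exact ⟨by rw [heq]; exact hhi, fun k hk hk' => hbelow k hk hk', le_refl lo, hlh⟩
  exact H (hi - lo).toNat lo hi le_rfl hlo hlh hhi hbelow

-- A's loop reaches exactly the first infeasible n and returns [(r-1)^2]*L
lemma pv_loop_spec (L M : Int) (hL : 1 ≤ L) :
    ∀ (fuel : Nat) (n r : Int), 10 ≤ n → n ≤ r → pvOkB L M r = false →
    (∀ k, n ≤ k → k < r → pvOkB L M k = true) → (r - n).toNat < fuel →
    pvLoopA L M fuel n = List.replicate L.toNat ((r - 1)^2) := by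
  intro fuel
  induction fuel with
  | zero => intro n r _ _ _ _ hfuel; omega
  | succ f ih =>
    intro n r hn hnr hr hks hfuel
    rw [pvLoopA]
    by_cases heq : n = r
    · have hcond : ¬ (pvCalcOps (List.replicate L.toNat (n^2)) * M < pvTOPS ∧
          pvCalcRam (List.replicate L.toNat (n^2)) < pvRAM_LIMIT_BYTES) := by
        rw [pv_cond_eq L M n hL, heq, hr]; simp
      subst heq
      rw [if_neg hcond]
    · have hok : pvOkB L M n = true := hks n le_rfl (by omega)
      have hcond : (pvCalcOps (List.replicate L.toNat (n^2)) * M < pvTOPS ∧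
          pvCalcRam (List.replicate L.toNat (n^2)) < pvRAM_LIMIT_BYTES) := by
        rw [pv_cond_eq L M n hL]; exact hok
      rw [if_pos hcond]
      exact ih (n+1) r (by omega) (by omega) hr (fun k hk hk' => hks k (by omega) hk') (by omega)

-- ===== VERDICT (by name: the statement is the Claim_ definition above) =====
theorem calculate_layers_spec : Claim_equal_calculate_layers := by
  intro L M _hDom hPre
  unfold Spec_calculate_layers calculate_layers calculate_layers_alt
  have hL : 1 ≤ L := hPre
  have hbig : pvOkB L M 40000 = false := pv_ok_big L M 40000 hL (by norm_num)
  obtain ⟨h1, h2, h3, h4⟩ := pv_bs_inv L M hL 10 40000 (by norm_num) (by norm_num) hbig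
    (fun k hk hk' => absurd hk' (by omega))
  set r := pvBS L M 10 40000 with hr
  have := pv_loop_spec L M hL 40000 10 r (by norm_num) h3 h1
    (fun k hk hk' => h2 k hk hk') (by omega)
  rw [this]
  congr 1
  ring
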